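-- pv_equiv track=rewrite | github.com/NiceCreeper3/lusning_python | Fun/inventory/S1710_inventory_exercise.py | inventory_unoptemised
-- ===== SOURCE A (Python) =====
-- def inventory_unoptemised(rows_to_make):
--     inv_lines = []
--
--     for inv in range(rows_to_make):
--
--         new_line = []
--
--         has_found_zero = False  # as found a new 0 and can stop the while
--         num_to_check = 0  # represends the nummber we are checking like 1|2|3|4|5
--
--         while not has_found_zero:
--
--             num_gattered = 0  # represends the amout of times the same nummber has ben found
--
--             for row in inv_lines:
--                 for line in row:
--                     if line == num_to_check:
--                         num_gattered += 1
--
--             # checkes its oven line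
--             for self_check in new_line:
--                 if self_check == num_to_check:
--                     num_gattered += 1
--
--             if num_gattered == 0:
--                 has_found_zero = True
--
--             num_to_check += 1 # goes up by one ind what number we are checking after
--             new_line.append(num_gattered)
--
--         inv_lines.append(new_line)  # addes the new line of numbers to the inventory
--
--     return inv_lines
-- ===== SOURCE B (Python) =====
-- def inventory_unoptemised(rows_to_make):
--     inv_lines = []
--     freq = {}  # running counts of every value appended so far (all rows + current row)
--     for _ in range(rows_to_make):
--         new_line = []
--         k = 0
--         while True:
--             c = freq.get(k, 0)
--             new_line.append(c)
--             freq[c] = freq.get(c, 0) + 1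
--             if c == 0:
--                 break
--             k += 1
--         inv_lines.append(new_line)
--     return inv_lines
-- ===== Notes on version B (the rewrite author's own statement) =====
-- stated objective: faster
-- what changed: Replaces A's full rescan of every previous row (plus the row under construction) for each counted number with one running frequency dictionary updated as each value is appended, so each count is an O(1) lookup.
import Mathlib
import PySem

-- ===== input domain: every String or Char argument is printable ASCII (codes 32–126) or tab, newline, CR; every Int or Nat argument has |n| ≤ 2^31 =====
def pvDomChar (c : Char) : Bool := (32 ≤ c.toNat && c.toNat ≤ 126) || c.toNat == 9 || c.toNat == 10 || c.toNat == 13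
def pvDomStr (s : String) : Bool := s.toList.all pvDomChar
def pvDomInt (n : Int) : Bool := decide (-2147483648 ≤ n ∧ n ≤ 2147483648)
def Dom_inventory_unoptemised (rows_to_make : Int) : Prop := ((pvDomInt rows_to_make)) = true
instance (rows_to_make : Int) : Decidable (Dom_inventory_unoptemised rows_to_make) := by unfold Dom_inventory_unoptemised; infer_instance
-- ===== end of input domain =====

-- B replaces A's full rescan of all rows for every counted number by one running
-- frequency dictionary updated as values are appended (asymptotically faster).
-- Both while-loops are ported with a fuel guard (2·(values so far)+8, provably more
-- iterations than the loop can take) that only makes the same computation total.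

-- ===== PORT A =====
-- the inner while loop of A: state = (new_line, num_to_check); each step rescans
-- inv_lines and new_line for num_to_check, appends the count, stops on a zero count
def pvWhileA : Nat → List (List Int) → List Int → Int → List Int
  | 0, _, nl, _ => nl
  | f + 1, inv, nl, k =>
    let g1 : Int := inv.foldl (fun acc row => row.foldl (fun a line => if line == k then a + 1 else a) acc) 0
    let g : Int := nl.foldl (fun a sc => if sc == k then a + 1 else a) g1
    if g = 0 then nl ++ [g] else pvWhileA f inv (nl ++ [g]) (k + 1)

def pvOuterA : Nat → List (List Int) → List (List Int)
  | 0, inv => inv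
  | n + 1, inv => pvOuterA n (inv ++ [pvWhileA (2 * inv.flatten.length + 8) inv [] 0])

def inventory_unoptemised (rows_to_make : Int) : List (List Int) :=
  pvOuterA rows_to_make.toNat []

-- ===== PORT B =====
-- the inner while loop of B: state = (freq, new_line, k); each step looks the count
-- up in the running frequency dict, appends it and bumps its own frequency
def pvWhileB : Nat → PySem.Dict Int Int → List Int → Int → List Int × PySem.Dict Int Int
  | 0, freq, nl, _ => (nl, freq)
  | f + 1, freq, nl, k =>
    let c : Int := freq.getD k 0
    let freq' := freq.insert c (freq.getD c 0 + 1)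
    if c = 0 then (nl ++ [c], freq') else pvWhileB f freq' (nl ++ [c]) (k + 1)

def pvOuterB : Nat → List (List Int) → PySem.Dict Int Int → List (List Int)
  | 0, inv, _ => inv
  | n + 1, inv, freq =>
    let r := pvWhileB (2 * inv.flatten.length + 8) freq [] 0
    pvOuterB n (inv ++ [r.1]) r.2

def inventory_unoptemised_alt (rows_to_make : Int) : List (List Int) :=
  pvOuterB rows_to_make.toNat [] PySem.Dict.empty

-- ===== PRECONDITION & SPEC =====
def Spec_inventory_unoptemised (rows_to_make : Int) (out : List (List Int)) : Prop := out = inventory_unoptemised_alt rows_to_make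
instance (rows_to_make : Int) (out : List (List Int)) : Decidable (Spec_inventory_unoptemised rows_to_make out) := by unfold Spec_inventory_unoptemised; infer_instance

-- ===== CLAIM (what is proved, stated in full; the proofs are below) =====
def Claim_equal_inventory_unoptemised : Prop := ∀ (rows_to_make : Int), Dom_inventory_unoptemised rows_to_make → Spec_inventory_unoptemised rows_to_make (inventory_unoptemised rows_to_make)

-- ===== LEMMAS AND PROOFS =====

-- the frequency dict is a faithful counter of all values appended so far
def pvInv (freq : PySem.Dict Int Int) (vals : List Int) : Prop :=
  ∀ k : Int, freq.getD k 0 = (vals.count k : Int)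

lemma pvInv_empty : pvInv PySem.Dict.empty [] := by
  intro k; simp [PySem.Dict.getD, PySem.Dict.get?, PySem.Dict.empty]

lemma pvInv_step {freq : PySem.Dict Int Int} {vals : List Int} (h : pvInv freq vals) (c : Int) :
    pvInv (freq.insert c (freq.getD c 0 + 1)) (vals ++ [c]) := by
  intro k
  by_cases hk : k = c
  · subst hk
    rw [PySem.Dict.getD_insert_self, h k]
    simp [List.count_append]
  · rw [PySem.Dict.getD_insert_of_ne freq _ _ hk, h k]
    simp [List.count_append, Ne.symm hk]

-- A's rescan of all rows plus its own line computes the count the dict maintains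
lemma pvCountA_eq (inv : List (List Int)) (nl : List Int) (k : Int) :
    nl.foldl (fun a sc => if sc == k then a + 1 else a)
      (inv.foldl (fun acc row => row.foldl (fun a line => if line == k then a + 1 else a) acc) 0)
    = ((inv.flatten ++ nl).count k : Int) := by
  rw [← List.foldl_flatten, PySem.List.foldl_beq_add_one, PySem.List.foldl_beq_add_one,
    List.count_append]
  push_cast
  ring

lemma pvWhile_eq (f : Nat) : ∀ (inv : List (List Int)) (nl : List Int) (k : Int)
    (freq : PySem.Dict Int Int), pvInv freq (inv.flatten ++ nl) →
    pvWhileA f inv nl k = (pvWhileB f freq nl k).1 ∧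
      pvInv (pvWhileB f freq nl k).2 (inv.flatten ++ (pvWhileB f freq nl k).1) := by
  induction f with
  | zero => intro inv nl k freq h; exact ⟨rfl, h⟩
  | succ f ih =>
    intro inv nl k freq h
    have hc : nl.foldl (fun a sc => if sc == k then a + 1 else a)
        (inv.foldl (fun acc row => row.foldl (fun a line => if line == k then a + 1 else a) acc) 0)
        = freq.getD k 0 := by rw [pvCountA_eq, h k]
    have h' : pvInv (freq.insert (freq.getD k 0) (freq.getD (freq.getD k 0) 0 + 1))
        (inv.flatten ++ (nl ++ [freq.getD k 0])) := by
      rw [← List.append_assoc]; exact pvInv_step h _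
    simp only [pvWhileA, pvWhileB, hc]
    by_cases hz : freq.getD k 0 = 0
    · simp only [hz]
      exact ⟨rfl, by simpa [hz] using h'⟩
    · simp only [if_neg hz]
      exact ih inv (nl ++ [freq.getD k 0]) (k + 1) _ h'

lemma pvOuter_eq (n : Nat) : ∀ (inv : List (List Int)) (freq : PySem.Dict Int Int),
    pvInv freq inv.flatten → pvOuterA n inv = pvOuterB n inv freq := by
  induction n with
  | zero => intro inv freq _; rfl
  | succ n ih =>
    intro inv freq h
    have h0 : pvInv freq (inv.flatten ++ []) := by simpa using h
    obtain ⟨h1, h2⟩ := pvWhile_eq (2 * inv.flatten.length + 8) inv [] 0 freq h0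
    simp only [pvOuterA, pvOuterB, h1]
    apply ih
    simpa [List.flatten_append] using h2

-- ===== VERDICT (by name: the statement is the Claim_ definition above) =====
theorem inventory_unoptemised_spec : Claim_equal_inventory_unoptemised := by
  intro rows _
  show inventory_unoptemised rows = inventory_unoptemised_alt rows
  exact pvOuter_eq rows.toNat [] PySem.Dict.empty pvInv_empty
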